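-- pv_equiv track=rewrite | github.com/rezavar/sql-to-excel-tool | utils/helpers.py | _format_table_stats
-- ===== SOURCE A (Python) =====
-- def _format_table_stats(
--     table_row_counts: dict[str, int],
--     table_groups: dict[str, list[str]],
--     complete_groups: list[str],
-- ) -> list[str]:
--     """فرمت جدول برای نمایش آمار دیتابیس موقت."""
--     rows = []
--     # نگاشت جدول -> گروه
--     table_to_group = {}
--     for group_name in complete_groups:
--         if group_name in table_groups:
--             for table in table_groups[group_name]:
--                 table_to_group[table] = group_name
--     # جداول مشتق‌شده در گروه wp نمایش داده شوند
--     if "wp" in complete_groups and "customer_purchases" in table_row_counts: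
--         table_to_group["customer_purchases"] = "wp"
--
--     # سطر هدر
--     rows.append("گروه | جدول | تعداد رکورد")
--     rows.append("-" * 45)
--
--     for table, count in sorted(table_row_counts.items()):
--         group = table_to_group.get(table, "-")
--         rows.append(f"{group} | {table} | {count}")
--
--     return rows
-- ===== SOURCE B (Python) =====
-- def _format_table_stats(
--     table_row_counts: dict[str, int],
--     table_groups: dict[str, list[str]],
--     complete_groups: list[str],
-- ) -> list[str]:
--     """Same stats table, but without the precomputed reverse map: the group of
--     each table is found by scanning complete_groups per row (last match wins)."""
--
--     def group_of(table: str) -> str: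
--         group = "-"
--         for name in complete_groups:
--             if table in table_groups.get(name, []):
--                 group = name
--         if table == "customer_purchases" and "wp" in complete_groups:
--             group = "wp"
--         return group
--
--     return ["گروه | جدول | تعداد رکورد", "-" * 45] + [
--         f"{group_of(table)} | {table} | {count}"
--         for table, count in sorted(table_row_counts.items())
--     ]
-- ===== Notes on version B (the rewrite author's own statement) =====
-- stated objective: simpler
-- what changed: B drops A's precomputed table->group reverse dict and its mutation-based override; each row's group is found by one inline last-match-wins scan of complete_groups (with the customer_purchases/wp override applied per row), and the result is a header list plus a comprehension.
import Mathlib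
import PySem

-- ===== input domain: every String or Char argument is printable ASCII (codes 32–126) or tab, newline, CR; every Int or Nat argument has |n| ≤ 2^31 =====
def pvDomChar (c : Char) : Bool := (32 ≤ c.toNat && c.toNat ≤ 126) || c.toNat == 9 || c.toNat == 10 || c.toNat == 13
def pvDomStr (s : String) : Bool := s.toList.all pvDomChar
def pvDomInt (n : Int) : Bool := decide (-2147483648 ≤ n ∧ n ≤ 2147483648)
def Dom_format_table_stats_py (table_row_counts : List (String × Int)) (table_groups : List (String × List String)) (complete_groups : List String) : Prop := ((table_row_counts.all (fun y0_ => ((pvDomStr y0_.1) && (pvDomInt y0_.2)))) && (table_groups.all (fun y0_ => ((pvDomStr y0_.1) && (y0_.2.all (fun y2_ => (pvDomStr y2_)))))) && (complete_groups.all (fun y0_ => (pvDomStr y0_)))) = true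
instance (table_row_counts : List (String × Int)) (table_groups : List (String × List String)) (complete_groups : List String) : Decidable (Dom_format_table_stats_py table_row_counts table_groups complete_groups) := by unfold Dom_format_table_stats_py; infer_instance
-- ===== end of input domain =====

-- B replaces A's precomputed table->group dict with a per-row inline scan of complete_groups (simpler decomposition, same results).

-- ===== PORT A =====
-- A's reverse-map construction (table -> group, later groups overwrite)
def complete_groups_to_dict (table_groups : List (String × List String)) (complete_groups : List String) : PySem.Dict String String :=
  let tgd := PySem.Dict.mk table_groups
  complete_groups.foldl
    (fun d group_name =>
      if tgd.contains group_name then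
        (tgd.getD group_name []).foldl (fun d table => d.insert table group_name) d
      else d)
    PySem.Dict.empty

def format_table_stats_py (table_row_counts : List (String × Int)) (table_groups : List (String × List String)) (complete_groups : List String) : List String :=
  let trcd := PySem.Dict.mk table_row_counts
  -- table_to_group built by iterating complete_groups (later groups overwrite)
  let table_to_group := complete_groups_to_dict table_groups complete_groups
  -- derived-table override
  let table_to_group :=
    if complete_groups.contains "wp" && trcd.contains "customer_purchases" then
      table_to_group.insert "customer_purchases" "wp"
    else table_to_group
  let rows : List String := ["گروه | جدول | تعداد رکورد", "---------------------------------------------"]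
  (PySem.List.sorted2 trcd.items (·.1) (·.2)).foldl
    (fun rows p => rows ++ [table_to_group.getD p.1 "-" ++ " | " ++ p.1 ++ " | " ++ PySem.Int.toStr p.2])
    rows

-- ===== PORT B =====
def pvGroupOf (table_groups : List (String × List String)) (complete_groups : List String) (table : String) : String :=
  let group := complete_groups.foldl
    (fun group name => if ((PySem.Dict.mk table_groups).getD name []).contains table then name else group)
    "-"
  if table == "customer_purchases" && complete_groups.contains "wp" then "wp" else group

def format_table_stats_py_alt (table_row_counts : List (String × Int)) (table_groups : List (String × List String)) (complete_groups : List String) : List String :=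
  ["گروه | جدول | تعداد رکورد", "---------------------------------------------"] ++
    (PySem.List.sorted2 (PySem.Dict.mk table_row_counts).items (·.1) (·.2)).map
      (fun p => pvGroupOf table_groups complete_groups p.1 ++ " | " ++ p.1 ++ " | " ++ PySem.Int.toStr p.2)

-- ===== PRECONDITION & SPEC =====
def Spec_format_table_stats_py (table_row_counts : List (String × Int)) (table_groups : List (String × List String)) (complete_groups : List String) (out : List String) : Prop := out = format_table_stats_py_alt table_row_counts table_groups complete_groups
instance (table_row_counts : List (String × Int)) (table_groups : List (String × List String)) (complete_groups : List String) (out : List String) : Decidable (Spec_format_table_stats_py table_row_counts table_groups complete_groups out) := by unfold Spec_format_table_stats_py; infer_instance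

-- ===== CLAIM (what is proved, stated in full; the proofs are below) =====
def Claim_equal_format_table_stats_py : Prop := ∀ (table_row_counts : List (String × Int)) (table_groups : List (String × List String)) (complete_groups : List String), Dom_format_table_stats_py table_row_counts table_groups complete_groups → Spec_format_table_stats_py table_row_counts table_groups complete_groups (format_table_stats_py table_row_counts table_groups complete_groups)

-- ===== LEMMAS AND PROOFS =====

-- inserting every element of l with value g: lookup of t gives g iff t ∈ l
lemma insert_all_getD (l : List String) (g t dflt : String) (d : PySem.Dict String String) :
    (l.foldl (fun d x => d.insert x g) d).getD t dflt
      = if l.contains t then g else d.getD t dflt := by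
  induction l generalizing d with
  | nil => simp
  | cons x xs ih =>
      simp only [List.foldl_cons, ih, List.contains_cons]
      rw [PySem.Dict.getD_insert]
      by_cases h2 : t = x
      · simp [h2]
      · simp [h2]

-- A's dict-building loop, read at one key t, IS B's last-match-wins scan
lemma build_scan (tgd : PySem.Dict String (List String)) (cg : List String)
    (t dflt : String) (d : PySem.Dict String String) :
    (cg.foldl
      (fun d g => if tgd.contains g then (tgd.getD g []).foldl (fun d x => d.insert x g) d else d)
      d).getD t dflt
      = cg.foldl (fun group name => if (tgd.getD name []).contains t then name else group)
          (d.getD t dflt) := by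
  induction cg generalizing d with
  | nil => rfl
  | cons g cg ih =>
      simp only [List.foldl_cons, ih]
      congr 1
      by_cases hc : tgd.contains g
      · simp [hc, insert_all_getD]
      · have hnil : tgd.getD g [] = [] :=
          PySem.Dict.getD_of_not_contains tgd [] (by simpa using hc)
        simp [hc, hnil]

-- ===== VERDICT (by name: the statement is the Claim_ definition above) =====
theorem format_table_stats_py_spec : Claim_equal_format_table_stats_py := by
  intro trc tg cg _
  unfold Spec_format_table_stats_py format_table_stats_py format_table_stats_py_alt
  rw [PySem.List.foldl_append_singleton_eq_map]
  congr 1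
  apply List.map_congr_left
  intro p hp
  have hkey : (PySem.Dict.mk trc).contains p.1 = true := by
    have hmem : p ∈ (PySem.Dict.mk trc).items :=
      (PySem.List.sorted2_perm _ _ _ _).mem_iff.mp hp
    exact (PySem.Dict.contains_iff_mem_keys _ _).mpr
      (PySem.Dict.mem_keys_of_mem_items (d := PySem.Dict.mk trc) hmem)
  have hbd := build_scan (PySem.Dict.mk tg) cg p.1 "-" PySem.Dict.empty
  rw [PySem.Dict.getD_empty] at hbd
  have hg : (if (cg.contains "wp" && (PySem.Dict.mk trc).contains "customer_purchases") = true
        then (complete_groups_to_dict tg cg).insert "customer_purchases" "wp"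
        else complete_groups_to_dict tg cg).getD p.1 "-" = pvGroupOf tg cg p.1 := by
    unfold pvGroupOf complete_groups_to_dict
    by_cases hco : (cg.contains "wp" && (PySem.Dict.mk trc).contains "customer_purchases") = true
    · rw [if_pos hco, PySem.Dict.getD_insert]
      by_cases hpt : p.1 = "customer_purchases"
      · have hwp : "wp" ∈ cg := by
          simpa using (Bool.and_eq_true_iff.mp hco).1
        simp [hpt, hwp]
      · have hb : (p.1 == "customer_purchases") = false := by simpa using hpt
        rw [if_neg hpt, hbd]
        simp [hb]
    · rw [if_neg hco, hbd]
      by_cases hpt : p.1 = "customer_purchases"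
      · have hwp : "wp" ∉ cg := by
          intro hmem
          rw [hpt] at hkey
          exact hco (by simp only [hkey, Bool.and_true]; simpa using hmem)
        simp [hwp]
      · have hb : (p.1 == "customer_purchases") = false := by simpa using hpt
        simp [hb]
  rw [hg]
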